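-- pv_equiv track=rewrite | github.com/zxalif/pyvidani | decoder.py | cluster_item
-- ===== SOURCE A (Python) =====
-- def get_next_index(data, item, last_index):
--     """Return next index from current index of an Item"""
--     for index in range(last_index + 1, len(data)):
--         if data[index] == item:
--             last_index = index
--             break
--     return last_index
--
-- def cluster_item(data, item, index):
--     remaining_items = data[index:]
--     if item not in remaining_items: return [], None, None
--     start_index = remaining_items.index(item)  # 1
--     last_index = start_index
--     done = False
--     while not done:
--         _last_index = get_next_index(remaining_items[:], item, last_index)
--         if last_index + 1 == _last_index:
--             last_index = _last_index
--         else: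
--             done = True
--             break
--     position = len(data) - len(remaining_items) + start_index
--     _last_index = len(data) - len(remaining_items) + start_index + last_index + 1
--     return remaining_items[start_index:last_index + 1], position, _last_index
-- ===== SOURCE B (Python) =====
-- def cluster_item(data, item, index):
--     # Single scan over data[index:]: find the first occurrence, then extend
--     # while consecutive neighbours equal item.
--     remaining = data[index:]
--     off = len(data) - len(remaining)
--     start = None
--     for i, x in enumerate(remaining):
--         if x == item:
--             start = i
--             break
--     if start is None:
--         return [], None, None
--     end = start + 1
--     while end < len(remaining) and remaining[end] == item:
--         end += 1
--     return remaining[start:end], off + start, off + start + end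
-- ===== Notes on version B (the rewrite author's own statement) =====
-- stated objective: simpler
-- what changed: A re-runs get_next_index over a fresh copy of the remaining list inside a done-flag while loop; B is one plain scan: find the first occurrence, then a local while loop counting consecutive equal neighbours.
import Mathlib
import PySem

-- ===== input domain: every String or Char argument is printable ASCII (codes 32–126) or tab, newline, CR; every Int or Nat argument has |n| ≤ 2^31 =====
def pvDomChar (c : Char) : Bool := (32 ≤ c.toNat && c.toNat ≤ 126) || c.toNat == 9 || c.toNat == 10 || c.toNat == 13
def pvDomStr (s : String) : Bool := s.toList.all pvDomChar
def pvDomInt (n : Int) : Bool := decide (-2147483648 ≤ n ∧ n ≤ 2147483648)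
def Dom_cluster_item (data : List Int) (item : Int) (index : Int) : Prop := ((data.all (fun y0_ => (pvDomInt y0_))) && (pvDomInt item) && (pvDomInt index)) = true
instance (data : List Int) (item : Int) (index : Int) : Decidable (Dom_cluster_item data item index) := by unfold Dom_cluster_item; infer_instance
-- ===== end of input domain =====

-- B: simpler single scan (find first occurrence, then count consecutive equal
-- neighbours) instead of A's done-flag loop of repeated get_next_index rescans;
-- same return value everywhere.

-- ===== PORT A =====
-- for index in range(last_index+1, len(data)): if data[index]==item: last_index=index; break
def get_next_index (data : List Int) (item : Int) (last_index : Int) : Int :=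
  match (PySem.List.pyRange (last_index + 1) (data.length : Int) 1).find?
      (fun i => PySem.List.pyGet? data i == some item) with
  | some i => i
  | none => last_index

-- A's 'while not done' loop; fuel = len(remaining)+1 suffices since last_index grows by 1
-- each iteration and stays below len(remaining)
def clusterLoopA : Nat → List Int → Int → Int → Int
  | 0, _, _, last => last
  | fuel + 1, rem, item, last =>
    let nl := get_next_index rem item last
    if last + 1 = nl then clusterLoopA fuel rem item nl else last

def cluster_item (data : List Int) (item : Int) (index : Int) : List Int × Option Int × Option Int :=
  let remaining := PySem.List.slice data (some index) none
  if remaining.contains item then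
    -- remaining.index(item): cannot raise here, guarded by the membership test
    let start : Nat := (PySem.List.index? remaining item).getD 0
    let last : Int := clusterLoopA (remaining.length + 1) remaining item (start : Int)
    let position : Int := (data.length : Int) - (remaining.length : Int) + start
    let lastIdx : Int := (data.length : Int) - (remaining.length : Int) + start + last + 1
    (PySem.List.slice remaining (some (start : Int)) (some (last + 1)), some position, some lastIdx)
  else ([], none, none)

-- ===== PORT B =====
-- while end < len(remaining) and remaining[end] == item: end += 1
def runEndB (rem : List Int) (item : Int) (e : Nat) : Nat :=
  if h : e < rem.length then
    if rem[e] = item then runEndB rem item (e + 1) else e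
  else e
termination_by rem.length - e

def cluster_item_alt (data : List Int) (item : Int) (index : Int) : List Int × Option Int × Option Int :=
  let remaining := PySem.List.slice data (some index) none
  let off : Int := (data.length : Int) - (remaining.length : Int)
  match remaining.findIdx? (· == item) with
  | none => ([], none, none)
  | some start =>
    let e := runEndB remaining item (start + 1)
    (PySem.List.slice remaining (some (start : Int)) (some (e : Int)),
     some (off + start), some (off + start + e))

-- ===== PRECONDITION & SPEC =====
def Spec_cluster_item (data : List Int) (item : Int) (index : Int) (out : List Int × Option Int × Option Int) : Prop := out = cluster_item_alt data item index
instance (data : List Int) (item : Int) (index : Int) (out : List Int × Option Int × Option Int) : Decidable (Spec_cluster_item data item index out) := by unfold Spec_cluster_item; infer_instance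

-- ===== CLAIM (what is proved, stated in full; the proofs are below) =====
def Claim_equal_cluster_item : Prop := ∀ (data : List Int) (item : Int) (index : Int), Dom_cluster_item data item index → Spec_cluster_item data item index (cluster_item data item index)

-- ===== LEMMAS AND PROOFS =====

theorem get_next_index_hit (rem : List Int) (item : Int) (last : Nat)
    (hlt : last + 1 < rem.length) (heq : rem[last + 1] = item) :
    get_next_index rem item (last : Int) = (last : Int) + 1 := by
  unfold get_next_index
  rw [PySem.List.pyRange_one_cons (by exact_mod_cast hlt)]
  have hget : PySem.List.pyGet? rem ((last : Int) + 1) = some item := by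
    have : ((last : Int) + 1) = ((last + 1 : Nat) : Int) := by push_cast; ring
    rw [this, PySem.List.pyGet?_natCast]
    simp [List.getElem?_eq_getElem hlt, heq]
  simp [hget]

theorem get_next_index_miss (rem : List Int) (item : Int) (last : Nat)
    (h : ¬ (last + 1 < rem.length ∧ rem[last + 1]? = some item)) :
    get_next_index rem item (last : Int) ≠ (last : Int) + 1 := by
  unfold get_next_index
  cases hf : (PySem.List.pyRange ((last : Int) + 1) (rem.length : Int) 1).find?
      (fun i => PySem.List.pyGet? rem i == some item) with
  | none => simp
  | some i =>
    have hp := List.find?_some hf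
    simp only [beq_iff_eq] at hp
    intro hcontra
    simp only [hcontra] at hp
    have : ((last : Int) + 1) = ((last + 1 : Nat) : Int) := by push_cast; ring
    rw [this, PySem.List.pyGet?_natCast] at hp
    have hlen : last + 1 < rem.length := by
      by_contra hge
      rw [List.getElem?_eq_none (by omega)] at hp
      simp at hp
    exact h ⟨hlen, hp⟩

theorem clusterLoopA_eq_runEndB (rem : List Int) (item : Int) :
    ∀ (fuel last : Nat), rem.length - last < fuel →
    clusterLoopA fuel rem item (last : Int) = ((runEndB rem item (last + 1) : Nat) : Int) - 1 := by
  intro fuel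
  induction fuel with
  | zero => intro last h; omega
  | succ fuel ih =>
    intro last hfuel
    by_cases hc : last + 1 < rem.length ∧ rem[last + 1]? = some item
    · obtain ⟨hlt, hv⟩ := hc
      have hv' : rem[last + 1] = item := by
        rwa [List.getElem?_eq_getElem hlt, Option.some_inj] at hv
      have hnl := get_next_index_hit rem item last hlt hv'
      show (if (last : Int) + 1 = get_next_index rem item (last : Int) then
          clusterLoopA fuel rem item (get_next_index rem item (last : Int))
        else (last : Int)) = _
      rw [hnl, if_pos rfl]
      rw [runEndB, dif_pos hlt, if_pos hv']
      have : ((last : Int) + 1) = ((last + 1 : Nat) : Int) := by push_cast; ring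
      rw [this, ih (last + 1) (by omega)]
    · have hnl := get_next_index_miss rem item last hc
      show (if (last : Int) + 1 = get_next_index rem item (last : Int) then
          clusterLoopA fuel rem item (get_next_index rem item (last : Int))
        else (last : Int)) = _
      rw [if_neg (fun h => hnl h.symm)]
      have hend : runEndB rem item (last + 1) = last + 1 := by
        rw [runEndB]
        by_cases hlt : last + 1 < rem.length
        · rw [dif_pos hlt, if_neg]
          intro hv; exact hc ⟨hlt, by rw [List.getElem?_eq_getElem hlt, hv]⟩
        · rw [dif_neg hlt]
      rw [hend]; push_cast; ring

theorem findIdx?_getElem_item (rem : List Int) (item : Int) (start : Nat)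
    (h : rem.findIdx? (· == item) = some start) :
    start < rem.length ∧ rem[start]? = some item := by
  have h1 := List.findIdx?_eq_some_iff_findIdx_eq.mp h
  have hlt : start < rem.length := h1.1
  refine ⟨hlt, ?_⟩
  have := List.findIdx?_eq_some_iff_getElem.mp h
  obtain ⟨hl, hp, _⟩ := this
  rw [List.getElem?_eq_getElem hlt]
  simpa using hp

-- ===== VERDICT (by name: the statement is the Claim_ definition above) =====
theorem cluster_item_spec : Claim_equal_cluster_item := by
  intro data item index _
  unfold Spec_cluster_item cluster_item cluster_item_alt
  cases hf : (PySem.List.slice data (some index) none).findIdx? (· == item) with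
  | none =>
    have hnotmem : item ∉ PySem.List.slice data (some index) none := by
      intro hmem
      have := List.findIdx?_eq_none_iff.mp hf item hmem
      simp at this
    simp [hf, hnotmem]
  | some start =>
    obtain ⟨hlt, hv⟩ := findIdx?_getElem_item _ item start hf
    have hv' : (PySem.List.slice data (some index) none)[start] = item := by
      rwa [List.getElem?_eq_getElem hlt, Option.some_inj] at hv
    have hmem : item ∈ PySem.List.slice data (some index) none := hv' ▸ List.getElem_mem hlt
    have hidx : PySem.List.index? (PySem.List.slice data (some index) none) item = some start := by
      rw [PySem.List.index?_eq_idxOf?]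
      simpa [List.idxOf?] using hf
    have hloop := clusterLoopA_eq_runEndB (PySem.List.slice data (some index) none) item
      ((PySem.List.slice data (some index) none).length + 1) start (by omega)
    have harg : (↑(runEndB (PySem.List.slice data (some index) none) item (start + 1)) : Int) - 1 + 1
        = (↑(runEndB (PySem.List.slice data (some index) none) item (start + 1)) : Int) := by ring
    simp only [hf, hidx, Option.getD_some, hloop, harg, hmem, List.contains_eq_mem, decide_true,
      if_true, Prod.mk.injEq, Option.some.injEq]
    exact ⟨trivial, trivial, by ring⟩
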